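-- pv_equiv track=rewrite | github.com/chahack/Projet-Mini-jeux | hitori.py | cellules_en_conflit
-- ===== SOURCE A (Python) =====
-- def colonnes(grille):
--     """
--     Prend en argument une liste de liste. Renvoie une liste de liste des colonnes de la grille.
--     >>> colonnes([[2,2,1,5,3], [2,3,1,4,5], [1,1,1,3,5], [1,3,5,4,2], [5,4,3,2,1]])
--     [[2, 2, 1, 1, 5], [2, 3, 1, 3, 4], [1, 1, 1, 5, 3], [5, 4, 3, 4, 2], [3, 5, 5, 2, 1]]
--     """
--
--     ensemble_colonnes = []
--
--     for i in range(len(grille[0])):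
--
--         colonne = []
--
--         for j in range(len(grille)):
--
--             colonne.append(grille[j][i])
--
--         ensemble_colonnes.append(colonne)
--
--     return ensemble_colonnes
--
-- def doublons(liste, index_liste, ensemble_doublons, etat):
--     """
--     Prend en argument une liste ; un nombre index_liste correspondant à l'index de la liste dans la grille ; une liste d'ensemble ensemble_doublons et une chaîne de caractère etat pour savoir si la liste est une ligne ou une colonne.
--     La fonction ajoute les ensembles de cellules en conflit de chaque ligne et de chaque colonne à la liste “ensemble_doublons”.
--     Modifie la liste ensemble_doublons sur place.
--     >>> doublons([2, 2, 1, 5, 3], 0, [], ligne)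
--     [{(1, 0), (0, 0)}]
--     >>> doublons([1, 1, 1, 3, 5], 2, [{(0, 1), (0, 0)}], ligne)
--     [{(0, 1), (0, 0)}, {(1, 2), (0, 2), (2, 2)}]
--     """
--
--     for element in liste :
--
--         doublons = set()
--
--         compte = []
--
--         for i,e in enumerate(liste):
--
--             if e == element :
--
--                 compte.append(i)
--
--         if len(compte) >= 2:
--
--             for i in compte :
--
--                 if etat == "ligne" :
--
--                     doublons.add((index_liste, i))
--
--                 else :
--
--                     doublons.add((i, index_liste))
--
--             if doublons not in ensemble_doublons :
--
--                 ensemble_doublons.append(doublons)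
--
-- def cellules_en_conflit(grille):
--     """
--     Prend en arguments une liste de liste grille décrivant le contenu des cellules.
--     Renvoie une liste d'ensemble (tous les ensembles de cellules en conflit entre elles) de toutes les cellules en conflits (cellules se situant sur la même ligne ou colonne et possédant le même chiffre).
--     >>> cellules_en_conflit([[2,2,1,5,3], [2,3,1,4,5], [1,1,1,3,5], [1,3,5,4,2], [5,4,3,2,1]])
--     {(0, 1), (1, 2), (0, 0), (1, 3), (3, 3), (3, 0), (0, 2), (3, 1), (2, 1), (1, 4), (2, 0), (2, 4), (2, 2), (1, 0), (1, 1)}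
--     """
--
--     ensemble_doublons = []
--
--     etat = "ligne"
--
--     index_liste = 0
--
--     for liste in grille :
--
--         doublons(liste, index_liste, ensemble_doublons, etat)
--
--         index_liste += 1
--
--     etat = "colonne"
--
--     ensemble_colonnes = colonnes(grille)
--
--     index_liste = 0
--
--     for liste in ensemble_colonnes :
--
--         doublons(liste, index_liste, ensemble_doublons, etat)
--
--         index_liste += 1
--
--     return ensemble_doublons
-- ===== SOURCE B (Python) =====
-- def cellules_en_conflit(grille):
--     """One pass per row/column: group cell coordinates by value in a dict
--     (first-occurrence key order), emit each group of size >= 2 as a set."""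
--     res = []
--
--     def emettre(groupes):
--         for g in groupes.values():
--             if len(g) >= 2:
--                 res.append(set(g))
--
--     for r, ligne in enumerate(grille):
--         groupes = {}
--         for c, v in enumerate(ligne):
--             groupes[v] = groupes.get(v, []) + [(r, c)]
--         emettre(groupes)
--
--     ncols = len(grille[0])
--     for c in range(ncols):
--         groupes = {}
--         for r in range(len(grille)):
--             v = grille[r][c]
--             groupes[v] = groupes.get(v, []) + [(r, c)]
--         emettre(groupes)
--
--     return res
-- ===== Notes on version B (the rewrite author's own statement) =====
-- stated objective: faster
-- what changed: B builds, in one pass per row/column, a dict grouping cell coordinates by value (first-occurrence key order) and emits each group of size >= 2 once, instead of A's doublons which rescans the entire line for every cell and deduplicates repeated groups by set membership in the accumulated output.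
import Mathlib
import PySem

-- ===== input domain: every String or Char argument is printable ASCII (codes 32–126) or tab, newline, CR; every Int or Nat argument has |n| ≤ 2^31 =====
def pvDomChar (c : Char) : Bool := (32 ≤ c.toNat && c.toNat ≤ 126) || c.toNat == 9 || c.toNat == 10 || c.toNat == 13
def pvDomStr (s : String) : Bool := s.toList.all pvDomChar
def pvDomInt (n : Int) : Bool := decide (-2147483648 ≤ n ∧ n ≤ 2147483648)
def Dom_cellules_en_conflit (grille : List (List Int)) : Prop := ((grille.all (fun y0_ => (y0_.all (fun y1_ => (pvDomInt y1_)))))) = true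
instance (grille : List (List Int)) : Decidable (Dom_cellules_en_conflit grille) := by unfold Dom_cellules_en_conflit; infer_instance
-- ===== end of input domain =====

-- B groups cell coordinates by value in one dict pass per row/column (first-occurrence
-- order) instead of A's rescan of the whole line for every cell of the line.

-- ===== PORT A =====
-- the (index_liste, i) / (i, index_liste) tuple added inside doublons' inner loop
def tagOf (etat : String) (index_liste i : Int) : Int × Int :=
  if etat == "ligne" then (index_liste, i) else (i, index_liste)

-- doublons(liste, index_liste, ensemble_doublons, etat): returns the mutated
-- ensemble_doublons (the Python mutates it in place). 'doublons not in
-- ensemble_doublons' compares SETS, ported exactly as Set.equal against each member.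
def doublonsPort (liste : List Int) (index_liste : Int)
    (ensemble_doublons : List (List (Int × Int))) (etat : String) :
    List (List (Int × Int)) :=
  liste.foldl (fun ens element =>
    let compte : List Int := (PySem.List.enumerate liste).foldl
      (fun c p => if p.2 == element then c ++ [p.1] else c) []
    if 2 ≤ compte.length then
      let d : PySem.Set (Int × Int) := compte.foldl
        (fun s i => PySem.Set.add s (tagOf etat index_liste i)) PySem.Set.empty
      if ens.any (fun s => PySem.Set.equal s d) then ens else ens ++ [d]
    else ens) ensemble_doublons

-- colonnes(grille); grille[0] and grille[j][i] are in range under Pre_ (pyGetD exact there)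
def colonnesPort (grille : List (List Int)) : List (List Int) :=
  (PySem.List.pyRange 0 (PySem.List.len (PySem.List.pyGetD grille 0 [])) 1).foldl
    (fun ens i =>
      ens ++ [(PySem.List.pyRange 0 (PySem.List.len grille) 1).foldl
        (fun col j =>
          col ++ [PySem.List.pyGetD (PySem.List.pyGetD grille j []) i 0]) []]) []

def cellules_en_conflit (grille : List (List Int)) : List (List (Int × Int)) :=
  let st1 := grille.foldl
    (fun (st : List (List (Int × Int)) × Int) liste =>
      (doublonsPort liste st.2 st.1 "ligne", st.2 + 1)) ([], 0)
  let st2 := (colonnesPort grille).foldl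
    (fun (st : List (List (Int × Int)) × Int) liste =>
      (doublonsPort liste st.2 st.1 "colonne", st.2 + 1)) (st1.1, 0)
  st2.1

-- ===== PORT B =====
-- groupes[v] = groupes.get(v, []) + [(r, c)] over one row (Dict.modify is that line)
def groupLigne (r : Int) (ligne : List Int) : PySem.Dict Int (List (Int × Int)) :=
  (PySem.List.enumerate ligne).foldl
    (fun d p => d.modify p.2 [] (· ++ [(r, p.1)])) PySem.Dict.empty

-- the same grouping over column c, reading grille[r][c] (in range under Pre_)
def groupColonne (grille : List (List Int)) (c : Int) : PySem.Dict Int (List (Int × Int)) :=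
  (PySem.List.pyRange 0 (PySem.List.len grille) 1).foldl
    (fun d r => d.modify (PySem.List.pyGetD (PySem.List.pyGetD grille r []) c 0) []
      (· ++ [(r, c)])) PySem.Dict.empty

-- emettre(groupes): append each group of size >= 2 as a set
def emettre (res : List (List (Int × Int))) (groupes : PySem.Dict Int (List (Int × Int))) :
    List (List (Int × Int)) :=
  (PySem.Dict.values groupes).foldl
    (fun res g => if 2 ≤ g.length then res ++ [PySem.Set.ofList g] else res) res

def cellules_en_conflit_alt (grille : List (List Int)) : List (List (Int × Int)) :=
  let res1 := (PySem.List.enumerate grille).foldl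
    (fun res p => emettre res (groupLigne p.1 p.2)) []
  (PySem.List.pyRange 0 (PySem.List.len (PySem.List.pyGetD grille 0 [])) 1).foldl
    (fun res c => emettre res (groupColonne grille c)) res1

-- ===== PRECONDITION & SPEC =====
-- Pre_ excludes exactly the inputs on which A raises IndexError: the empty grille
-- (colonnes reads grille[0]) and grids where some row is shorter than row 0
-- (colonnes reads grille[j][i] for every i < len(grille[0])).
def Pre_cellules_en_conflit (grille : List (List Int)) : Prop :=
  grille ≠ [] ∧ ∀ row ∈ grille, (grille.headD []).length ≤ row.length
instance (grille : List (List Int)) : Decidable (Pre_cellules_en_conflit grille) := by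
  unfold Pre_cellules_en_conflit; infer_instance

def pvWitness_cellules_en_conflit : List (List Int) := [[1, 1], [2, 3]]

def Spec_cellules_en_conflit (grille : List (List Int)) (out : List (List (Int × Int))) : Prop := out = cellules_en_conflit_alt grille
instance (grille : List (List Int)) (out : List (List (Int × Int))) : Decidable (Spec_cellules_en_conflit grille out) := by unfold Spec_cellules_en_conflit; infer_instance

-- ===== CLAIM (what is proved, stated in full; the proofs are below) =====
def Claim_equal_cellules_en_conflit : Prop := ∀ (grille : List (List Int)), Dom_cellules_en_conflit grille → Pre_cellules_en_conflit grille → Spec_cellules_en_conflit grille (cellules_en_conflit grille)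

-- ===== LEMMAS AND PROOFS =====

theorem pv_countP_enumerate (l : List Int) (v : Int) :
    ∀ s : Int, (PySem.List.enumerate l s).countP (fun p => p.2 == v) = l.count v := by
  induction l with
  | nil => intro s; simp [PySem.List.enumerate_nil]
  | cons x xs ih =>
    intro s
    simp [PySem.List.enumerate_cons, List.countP_cons, List.count_cons, ih (s+1)]

def lineTags (f : Int → Int × Int) (l : List Int) (v : Int) : List (Int × Int) :=
  ((PySem.List.enumerate l).filter (fun p => p.2 == v)).map (fun p => f p.1)

theorem pv_length_lineTags (f : Int → Int × Int) (l : List Int) (v : Int) :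
    (lineTags f l v).length = l.count v := by
  rw [lineTags, List.length_map, ← List.countP_eq_length_filter, pv_countP_enumerate]

theorem pv_mem_lineTags (f : Int → Int × Int) (l : List Int) (v : Int) (x : Int × Int) :
    x ∈ lineTags f l v ↔ ∃ k : Nat, ∃ _ : k < l.length, l[k] = v ∧ x = f (k : Int) := by
  simp only [lineTags, List.mem_map, List.mem_filter, PySem.List.mem_enumerate_iff]
  constructor
  · rintro ⟨p, ⟨⟨k, hk, rfl⟩, hpv⟩, rfl⟩
    exact ⟨k, hk, by simpa using hpv, by simp⟩
  · rintro ⟨k, hk, hv, rfl⟩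
    exact ⟨((k:Int), l[k]), ⟨⟨k, hk, by simp⟩, by simpa using hv⟩, rfl⟩

theorem pv_nodup_lineTags (f : Int → Int × Int) (hf : Function.Injective f)
    (l : List Int) (v : Int) : (lineTags f l v).Nodup := by
  have h1 : (PySem.List.enumerate l 0).Pairwise (fun p q => p.1 < q.1) :=
    PySem.List.pairwise_lt_enumerate l 0
  have h2 := h1.filter (fun p => p.2 == v)
  unfold lineTags List.Nodup
  rw [List.pairwise_map]
  exact h2.imp (fun {a b} h => fun he => absurd (hf he) (by omega))

theorem pv_lineTags_ne_nil (f : Int → Int × Int) (l : List Int) (v : Int) (hv : v ∈ l) :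
    lineTags f l v ≠ [] := by
  have := pv_length_lineTags f l v
  have hc : 0 < l.count v := List.count_pos_iff.mpr hv
  intro h; rw [h] at this; simp at this; omega

theorem pv_equal_false_of_right_notin (s t : List (Int × Int)) (x : Int × Int)
    (hxt : x ∈ t) (hxs : x ∉ s) : PySem.Set.equal s t = false := by
  cases h : PySem.Set.equal s t with
  | false => rfl
  | true => exact absurd ((PySem.Set.equal_iff s t |>.mp h x).mpr hxt) hxs

theorem pv_equal_false_of_left_notin (s t : List (Int × Int)) (x : Int × Int)
    (hxs : x ∈ s) (hxt : x ∉ t) : PySem.Set.equal s t = false := by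
  cases h : PySem.Set.equal s t with
  | false => rfl
  | true => exact absurd ((PySem.Set.equal_iff s t |>.mp h x).mp hxs) hxt

theorem pv_eq_of_equal_lineTags (f : Int → Int × Int) (hf : Function.Injective f)
    (l : List Int) (v w : Int) (hv : v ∈ l) (_hw : w ∈ l)
    (h : PySem.Set.equal (lineTags f l w) (lineTags f l v) = true) : w = v := by
  obtain ⟨k, hk, hkv⟩ := List.mem_iff_getElem.mp hv
  have hx : f (k:Int) ∈ lineTags f l v :=
    (pv_mem_lineTags f l v _).mpr ⟨k, hk, hkv, rfl⟩
  have hx2 : f (k:Int) ∈ lineTags f l w :=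
    (PySem.Set.equal_iff _ _ |>.mp h _).mpr hx
  obtain ⟨k', hk', hk'w, he⟩ := (pv_mem_lineTags f l w _).mp hx2
  have hkk : k = k' := by exact_mod_cast hf he
  subst hkk
  rw [← hkv, ← hk'w]

def pvE (f : Int → Int × Int) (l : List Int) (s : List Int) : List (List (Int × Int)) :=
  ((PySem.Set.ofList s).filter (fun v => decide (2 ≤ l.count v))).map (lineTags f l)

theorem pv_line_fold (f : Int → Int × Int) (hf : Function.Injective f) (l : List Int) :
    ∀ (todo seen : List Int) (acc : List (List (Int × Int))),
    (∀ s ∈ acc, ∀ v ∈ l, PySem.Set.equal s (lineTags f l v) = false) →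
    (∀ v ∈ todo, v ∈ l) → (∀ v ∈ seen, v ∈ l) →
    todo.foldl (fun ens e =>
        if 2 ≤ l.count e then
          (if ens.any (fun s => PySem.Set.equal s (lineTags f l e)) then ens
           else ens ++ [lineTags f l e])
        else ens) (acc ++ pvE f l seen)
      = acc ++ pvE f l (seen ++ todo) := by
  intro todo
  induction todo with
  | nil => intro seen acc _ _ _; simp
  | cons e todo' ih =>
    intro seen acc hfresh htodo hseen
    have he : e ∈ l := htodo e (List.mem_cons_self)
    have hmem_ofList : e ∈ PySem.Set.ofList seen ↔ e ∈ seen := PySem.Set.mem_ofList seen e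
    have hseen' : ∀ v ∈ seen ++ [e], v ∈ l := by
      intro v hv
      rcases List.mem_append.mp hv with h | h
      · exact hseen v h
      · simp at h; subst h; exact he
    have htodo' : ∀ v ∈ todo', v ∈ l := fun v hv => htodo v (List.mem_cons_of_mem _ hv)
    have ihx := ih (seen ++ [e]) acc hfresh htodo' hseen'
    rw [List.append_assoc] at ihx
    simp only [List.singleton_append] at ihx
    simp only [List.foldl_cons]
    by_cases h2 : 2 ≤ l.count e
    · have hany : (acc ++ pvE f l seen).any (fun s => PySem.Set.equal s (lineTags f l e))
          = decide (e ∈ seen) := by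
        rw [List.any_append]
        have hacc : acc.any (fun s => PySem.Set.equal s (lineTags f l e)) = false := by
          rw [List.any_eq_false]; intro s hs; simp [hfresh s hs e he]
        rw [hacc, Bool.false_or]
        by_cases hes : e ∈ seen
        · have htin : lineTags f l e ∈ pvE f l seen := by
            unfold pvE
            exact List.mem_map_of_mem (List.mem_filter.mpr ⟨hmem_ofList.mpr hes, by simpa⟩)
          have hrefl : PySem.Set.equal (lineTags f l e) (lineTags f l e) = true := by
            rw [PySem.Set.equal_iff]; intro x; rfl
          have hA : (pvE f l seen).any (fun s => PySem.Set.equal s (lineTags f l e)) = true :=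
            List.any_eq_true.mpr ⟨_, htin, hrefl⟩
          simp [hes, hA]
        · have hA : (pvE f l seen).any (fun s => PySem.Set.equal s (lineTags f l e)) = false := by
            rw [List.any_eq_false]
            intro s hs
            unfold pvE at hs
            obtain ⟨w, hw, rfl⟩ := List.mem_map.mp hs
            have hwseen : w ∈ seen := (PySem.Set.mem_ofList seen w).mp (List.mem_filter.mp hw).1
            intro hcon
            exact hes (pv_eq_of_equal_lineTags f hf l e w he (hseen w hwseen) hcon ▸ hwseen)
          simp [hes, hA]
      rw [if_pos h2, hany]
      by_cases hes : e ∈ seen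
      · have hE : pvE f l (seen ++ [e]) = pvE f l seen := by
          unfold pvE
          rw [PySem.Set.ofList_append_singleton, PySem.Set.add_eq_ite,
            if_pos (hmem_ofList.mpr hes)]
        rw [if_pos (by simp [hes])]
        rw [hE] at ihx
        exact ihx
      · have hE : pvE f l (seen ++ [e]) = pvE f l seen ++ [lineTags f l e] := by
          unfold pvE
          rw [PySem.Set.ofList_append_singleton, PySem.Set.add_eq_ite,
            if_neg (fun hc => hes (hmem_ofList.mp hc)), List.filter_append, List.map_append]
          simp [h2]
        rw [if_neg (by simp [hes])]
        rw [hE, ← List.append_assoc] at ihx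
        exact ihx
    · have hE : pvE f l (seen ++ [e]) = pvE f l seen := by
        unfold pvE
        rw [PySem.Set.ofList_append_singleton, PySem.Set.add_eq_ite]
        by_cases hes : e ∈ PySem.Set.ofList seen
        · rw [if_pos hes]
        · rw [if_neg hes, List.filter_append, List.map_append]
          simp [h2]
      rw [if_neg h2]
      rw [hE] at ihx
      exact ihx



theorem pv_doublonsPort_eq (l : List Int) (idx : Int) (etat : String)
    (hf : Function.Injective (tagOf etat idx)) (acc : List (List (Int × Int)))
    (fresh : ∀ s ∈ acc, ∀ v ∈ l,
      PySem.Set.equal s (lineTags (tagOf etat idx) l v) = false) :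
    doublonsPort l idx acc etat = acc ++ pvE (tagOf etat idx) l l := by
  unfold doublonsPort
  have hbody : ∀ (ens : List (List (Int × Int))) (e : Int), e ∈ l →
      (let compte : List Int := (PySem.List.enumerate l).foldl
        (fun c p => if p.2 == e then c ++ [p.1] else c) []
       if 2 ≤ compte.length then
        let d : PySem.Set (Int × Int) := compte.foldl
          (fun s i => PySem.Set.add s (tagOf etat idx i)) PySem.Set.empty
        if ens.any (fun s => PySem.Set.equal s d) then ens else ens ++ [d]
       else ens)
      = (if 2 ≤ l.count e then
          (if ens.any (fun s => PySem.Set.equal s (lineTags (tagOf etat idx) l e)) then ens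
           else ens ++ [lineTags (tagOf etat idx) l e])
         else ens) := by
    intro ens e _
    have hc : ((PySem.List.enumerate l).foldl
        (fun c p => if p.2 == e then c ++ [p.1] else c) ([] : List Int))
        = ((PySem.List.enumerate l).filter (fun p => p.2 == e)).map (fun p => p.1) := by
      rw [PySem.List.foldl_append_if]; simp
    have hlen : (((PySem.List.enumerate l).filter (fun p => p.2 == e)).map
        (fun p : Int × Int => p.1)).length = l.count e := by
      rw [List.length_map, ← List.countP_eq_length_filter, pv_countP_enumerate]
    have hd : (((PySem.List.enumerate l).filter (fun p => p.2 == e)).map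
          (fun p : Int × Int => p.1)).foldl
          (fun s i => PySem.Set.add s (tagOf etat idx i)) PySem.Set.empty
        = lineTags (tagOf etat idx) l e := by
      rw [← PySem.Set.update_map_eq_foldl_add, PySem.Set.update_empty, List.map_map]
      exact PySem.Set.ofList_eq_self_of_nodup _ (pv_nodup_lineTags _ hf l e)
    simp only [hc, hlen, hd]
  have h1 := PySem.List.foldl_congr_mem (init := acc)
      (g := fun ens e =>
        if 2 ≤ l.count e then
          (if ens.any (fun s => PySem.Set.equal s (lineTags (tagOf etat idx) l e)) then ens
           else ens ++ [lineTags (tagOf etat idx) l e])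
        else ens)
      (h := fun ens e hel => hbody ens e hel)
  have h2 := pv_line_fold (tagOf etat idx) hf l l [] acc fresh (fun v hv => hv) (by simp)
  exact h1.trans (by simpa [pvE] using h2)

theorem pv_tag_ligne (idx i : Int) : tagOf "ligne" idx i = (idx, i) := rfl
theorem pv_tag_colonne (idx i : Int) : tagOf "colonne" idx i = (i, idx) := rfl

theorem pv_tag_ligne_inj (idx : Int) : Function.Injective (tagOf "ligne" idx) := by
  intro a b h
  have := congrArg Prod.snd h
  simpa [pv_tag_ligne] using this

theorem pv_tag_colonne_inj (idx : Int) : Function.Injective (tagOf "colonne" idx) := by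
  intro a b h
  have := congrArg Prod.fst h
  simpa [pv_tag_colonne] using this

theorem pv_two_mem {α : Type} (s : List α) (h2 : 2 ≤ s.length) (hnd : s.Nodup) :
    ∃ x ∈ s, ∃ y ∈ s, x ≠ y := by
  match s, h2 with
  | x :: y :: t, _ =>
    refine ⟨x, List.mem_cons_self, y, List.mem_cons_of_mem _ List.mem_cons_self, ?_⟩
    intro he; subst he
    exact (List.nodup_cons.mp hnd).1 List.mem_cons_self

-- two lines of the same kind but different index never produce set-equal groups
theorem pv_equal_false_same (etat : String) (i j v w : Int) (lp lq : List Int)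
    (hij : i ≠ j) (hw : w ∈ lq) :
    PySem.Set.equal (lineTags (tagOf etat i) lp v) (lineTags (tagOf etat j) lq w) = false := by
  obtain ⟨x, hx⟩ := List.exists_mem_of_ne_nil _ (pv_lineTags_ne_nil (tagOf etat j) lq w hw)
  refine pv_equal_false_of_right_notin _ _ x hx ?_
  obtain ⟨k, _, _, rfl⟩ := (pv_mem_lineTags _ lq w x).mp hx
  intro hxin
  obtain ⟨k', _, _, he⟩ := (pv_mem_lineTags _ lp v _).mp hxin
  cases hb : etat == "ligne" <;> simp [tagOf, hb, Prod.ext_iff] at he <;> exact hij (by omega)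

-- a row group (size ≥ 2) is never set-equal to a column group
theorem pv_equal_false_row_col (r c v w : Int) (lp lq : List Int)
    (h2 : 2 ≤ lp.count v) :
    PySem.Set.equal (lineTags (tagOf "ligne" r) lp v)
      (lineTags (tagOf "colonne" c) lq w) = false := by
  have hlen : 2 ≤ (lineTags (tagOf "ligne" r) lp v).length := by
    rw [pv_length_lineTags]; exact h2
  obtain ⟨x, hx, y, hy, hxy⟩ := pv_two_mem _ hlen
    (pv_nodup_lineTags _ (pv_tag_ligne_inj r) lp v)
  obtain ⟨k, _, _, rfl⟩ := (pv_mem_lineTags _ lp v x).mp hx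
  obtain ⟨k', _, _, rfl⟩ := (pv_mem_lineTags _ lp v y).mp hy
  have hkk : (k : Int) ≠ (k' : Int) := by
    intro h; exact hxy (by rw [h])
  have hnotc : tagOf "ligne" r k ∉ lineTags (tagOf "colonne" c) lq w ∨
      tagOf "ligne" r k' ∉ lineTags (tagOf "colonne" c) lq w := by
    by_cases hkc : (k : Int) = c
    · right
      intro hmem
      obtain ⟨m, _, _, he⟩ := (pv_mem_lineTags _ lq w _).mp hmem
      rw [pv_tag_ligne, pv_tag_colonne, Prod.ext_iff] at he
      exact hkk (by omega)
    · left
      intro hmem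
      obtain ⟨m, _, _, he⟩ := (pv_mem_lineTags _ lq w _).mp hmem
      rw [pv_tag_ligne, pv_tag_colonne, Prod.ext_iff] at he
      exact hkc he.2
  rcases hnotc with h | h
  · exact pv_equal_false_of_left_notin _ _ _ hx h
  · exact pv_equal_false_of_left_notin _ _ _ hy h

-- folding A's doublons over a list of (index, line) pairs with pairwise-distinct indices
theorem pv_fold_lines (etat : String)
    (hinj : ∀ idx : Int, Function.Injective (tagOf etat idx))
    (hsame : ∀ (i j v w : Int) (lp lq : List Int), i ≠ j → w ∈ lq →
      PySem.Set.equal (lineTags (tagOf etat i) lp v) (lineTags (tagOf etat j) lq w) = false) :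
    ∀ (ps : List (Int × List Int)) (acc : List (List (Int × Int))),
    (∀ s ∈ acc, ∀ p ∈ ps, ∀ v ∈ p.2,
      PySem.Set.equal s (lineTags (tagOf etat p.1) p.2 v) = false) →
    ps.Pairwise (fun p q => p.1 ≠ q.1) →
    ps.foldl (fun a p => doublonsPort p.2 p.1 a etat) acc
      = acc ++ ps.flatMap (fun p => pvE (tagOf etat p.1) p.2 p.2) := by
  intro ps
  induction ps with
  | nil => intro acc _ _; simp
  | cons p ps' ih =>
    intro acc hfresh hpw
    simp only [List.foldl_cons]
    rw [pv_doublonsPort_eq p.2 p.1 etat (hinj p.1) acc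
      (fun s hs v hv => hfresh s hs p List.mem_cons_self v hv)]
    rw [ih (acc ++ pvE (tagOf etat p.1) p.2 p.2) ?_ (List.pairwise_cons.mp hpw).2]
    · simp
    · intro s hs q hq v hv
      rcases List.mem_append.mp hs with h | h
      · exact hfresh s h q (List.mem_cons_of_mem _ hq) v hv
      · unfold pvE at h
        obtain ⟨w, hw, rfl⟩ := List.mem_map.mp h
        have hne : p.1 ≠ q.1 := (List.pairwise_cons.mp hpw).1 q hq
        exact hsame p.1 q.1 w v p.2 q.2 hne hv




theorem pv_enumerate_map {α β : Type} (h : α → β) (xs : List α) :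
    ∀ s : Int, PySem.List.enumerate (xs.map h) s
      = (PySem.List.enumerate xs s).map (fun p => (p.1, h p.2)) := by
  induction xs with
  | nil => intro s; simp [PySem.List.enumerate_nil]
  | cons x xs ih => intro s; simp [PySem.List.enumerate_cons, ih (s + 1)]

-- B's grouping dict for one line, emitted: exactly that line's contribution
theorem pv_emettre_group (f : Int → Int × Int) (hf : Function.Injective f)
    (l : List Int) (res : List (List (Int × Int))) :
    emettre res ((PySem.List.enumerate l).foldl
      (fun d p => d.modify p.2 [] (· ++ [f p.1])) PySem.Dict.empty)
      = res ++ pvE f l l := by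
  have hdict : (PySem.List.enumerate l).foldl
      (fun d p => d.modify p.2 [] (· ++ [f p.1])) PySem.Dict.empty
      = (((PySem.List.enumerate l).map (fun p => (p.2, f p.1))).foldl
          (fun d q => d.modify q.1 [] (· ++ [q.2])) PySem.Dict.empty) := by
    rw [List.foldl_map]
  set q := (PySem.List.enumerate l).map (fun p : Int × Int => (p.2, f p.1)) with hq
  set dict := q.foldl (fun d q => d.modify q.1 [] (· ++ [q.2])) PySem.Dict.empty with hdictdef
  have hkeys : dict.keys = PySem.Set.ofList l := by
    rw [hdictdef, PySem.Dict.keys_foldl_modify_key]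
    rw [PySem.Dict.keys_empty, PySem.Set.update_nil_left, hq, List.map_map]
    have : ((fun p : Int × (Int × Int) => p.1) ∘ fun p : Int × Int => (p.2, f p.1))
        = fun p : Int × Int => p.2 := rfl
    rw [this, PySem.List.map_snd_enumerate]
  have hnd : dict.keys.Nodup := by
    rw [hkeys]; exact PySem.Set.nodup_ofList l
  have hgetD : ∀ v : Int, dict.getD v [] = lineTags f l v := by
    intro v
    rw [hdictdef, PySem.Dict.getD_foldl_modify_append, PySem.Dict.getD_empty]
    rw [hq, List.filter_map, List.map_map]
    have h1 : ((fun q : Int × (Int × Int) => q.1 == v) ∘ fun p : Int × Int => (p.2, f p.1))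
        = fun p : Int × Int => p.2 == v := rfl
    have h2 : ((fun q : Int × (Int × Int) => q.2) ∘ fun p : Int × Int => (p.2, f p.1))
        = fun p : Int × Int => f p.1 := rfl
    rw [h1, h2, List.nil_append, lineTags]
  have hvals : dict.values = (PySem.Set.ofList l).map (lineTags f l) := by
    rw [PySem.Dict.values_eq_map_keys dict hnd [], hkeys]
    exact List.map_congr_left (fun v _ => hgetD v)
  rw [hdict]
  unfold emettre
  rw [hvals, PySem.List.foldl_append_ite, List.filter_map]
  have h3 : ((PySem.Set.ofList l).filter ((fun g : List (Int × Int) =>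
      decide (2 ≤ g.length)) ∘ lineTags f l))
      = (PySem.Set.ofList l).filter (fun v => decide (2 ≤ l.count v)) := by
    apply List.filter_congr
    intro v _
    simp only [Function.comp, pv_length_lineTags]
  rw [h3, List.map_map]
  unfold pvE
  congr 1
  apply List.map_congr_left
  intro v _
  exact PySem.Set.ofList_eq_self_of_nodup _ (pv_nodup_lineTags f hf l v)



def colL (g : List (List Int)) (i : Int) : List Int :=
  g.map (fun row => PySem.List.pyGetD row i 0)

theorem pv_foldl_counter {α β : Type} (g : List α) (F : β → Int → α → β) :
    ∀ (a : β) (n : Int),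
    (g.foldl (fun (st : β × Int) x => (F st.1 st.2 x, st.2 + 1)) (a, n)).1
      = (PySem.List.enumerate g n).foldl (fun acc p => F acc p.1 p.2) a := by
  induction g with
  | nil => intro a n; simp [PySem.List.enumerate_nil]
  | cons x xs ih =>
    intro a n
    simp only [List.foldl_cons, PySem.List.enumerate_cons]
    exact ih (F a n x) (n + 1)

theorem pv_colonnes_eq (g : List (List Int)) :
    colonnesPort g
      = (PySem.List.pyRange 0 (PySem.List.len (PySem.List.pyGetD g 0 [])) 1).map (colL g) := by
  unfold colonnesPort
  rw [PySem.List.foldl_append_singleton_eq_map, List.nil_append]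
  apply List.map_congr_left
  intro i _
  rw [PySem.List.foldl_pyRange_zero_pyGetD (f := fun col row =>
    col ++ [PySem.List.pyGetD row i 0]) (d := [])]
  rw [PySem.List.foldl_append_singleton_eq_map, List.nil_append]
  rfl

theorem pv_enumerate_pyRange (N : Int) (hN : 0 ≤ N) :
    PySem.List.enumerate (PySem.List.pyRange 0 N 1) 0
      = (PySem.List.pyRange 0 N 1).map (fun j => (j, j)) := by
  rw [PySem.List.enumerate_eq_map_pyRange (d := 0)]
  have hlen : PySem.List.len (PySem.List.pyRange 0 N 1) = N := by
    rw [PySem.List.len_eq, PySem.List.length_pyRange_one]; omega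
  rw [hlen]
  apply List.map_congr_left
  intro j hj
  have hjm := PySem.List.mem_pyRange_one.mp hj
  have hlen2 : (PySem.List.pyRange 0 N 1).length = (N - 0).toNat :=
    PySem.List.length_pyRange_one 0 N
  have hget : PySem.List.pyGetD (PySem.List.pyRange 0 N 1) j 0 = j := by
    rw [PySem.List.pyGetD_eq_getElem _ _ hjm.1
      (by rw [hlen2]; omega)]
    rw [PySem.List.getElem_pyRange_one]
    omega
  rw [hget]

theorem pv_flatMap_map {α β γ : Type} (l : List α) (f : α → β) (h : β → List γ) :
    (l.map f).flatMap h = l.flatMap (fun x => h (f x)) := by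
  induction l with
  | nil => rfl
  | cons x xs ih => simp [List.flatMap_cons, ih]

theorem pv_A_eq (g : List (List Int)) :
    cellules_en_conflit g
      = (PySem.List.enumerate g).flatMap (fun p => pvE (tagOf "ligne" p.1) p.2 p.2)
        ++ ((PySem.List.pyRange 0 (PySem.List.len (PySem.List.pyGetD g 0 [])) 1).map
              (fun j => (j, colL g j))).flatMap
            (fun p => pvE (tagOf "colonne" p.1) p.2 p.2) := by
  unfold cellules_en_conflit
  rw [pv_foldl_counter (colonnesPort g) (fun a n x => doublonsPort x n a "colonne"),
      pv_foldl_counter g (fun a n x => doublonsPort x n a "ligne")]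
  have hrows : (PySem.List.enumerate g).foldl
      (fun acc p => doublonsPort p.2 p.1 acc "ligne") []
      = (PySem.List.enumerate g).flatMap (fun p => pvE (tagOf "ligne" p.1) p.2 p.2) := by
    rw [pv_fold_lines "ligne" pv_tag_ligne_inj
      (fun i j v w lp lq hij hw => pv_equal_false_same "ligne" i j v w lp lq hij hw)
      (PySem.List.enumerate g) [] (by intro s hs; simp at hs)
      ((PySem.List.pairwise_lt_enumerate g 0).imp (fun h => ne_of_lt h))]
    simp
  rw [hrows]
  have hN : (0:Int) ≤ PySem.List.len (PySem.List.pyGetD g 0 []) := by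
    rw [PySem.List.len_eq]; exact Int.natCast_nonneg _
  rw [pv_colonnes_eq, pv_enumerate_map (colL g) _ 0, pv_enumerate_pyRange _ hN,
    List.map_map]
  have hpw : ((PySem.List.pyRange 0 (PySem.List.len (PySem.List.pyGetD g 0 [])) 1).map
      (fun j => ((fun p : Int × Int => (p.1, colL g p.2)) ∘ (fun j : Int => (j, j))) j)).Pairwise
      (fun p q : Int × List Int => p.1 ≠ q.1) := by
    rw [List.pairwise_map]
    exact (PySem.List.pairwise_lt_pyRange_one _ _).imp (fun h => ne_of_lt h)
  rw [pv_fold_lines "colonne" pv_tag_colonne_inj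
    (fun i j v w lp lq hij hw => pv_equal_false_same "colonne" i j v w lp lq hij hw)
    _ _ ?_ ?_]
  · rfl
  · intro s hs q hq v hv
    obtain ⟨p, hp, hsp⟩ := List.mem_flatMap.mp hs
    unfold pvE at hsp
    obtain ⟨w, hw, rfl⟩ := List.mem_map.mp hsp
    have h2 : 2 ≤ p.2.count w := of_decide_eq_true (List.mem_filter.mp hw).2
    exact pv_equal_false_row_col p.1 q.1 w v p.2 q.2 h2
  · exact hpw

theorem pv_emettre_groupLigne (r : Int) (l : List Int) (res : List (List (Int × Int))) :
    emettre res (groupLigne r l) = res ++ pvE (tagOf "ligne" r) l l := by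
  have h := pv_emettre_group (fun i => (r, i))
    (by intro a b hab; simpa using congrArg Prod.snd hab) l res
  have ht : tagOf "ligne" r = fun i => (r, i) := funext (fun i => pv_tag_ligne r i)
  rw [ht]
  exact h

theorem pv_groupColonne_eq (g : List (List Int)) (c : Int) :
    groupColonne g c = (PySem.List.enumerate (colL g c)).foldl
      (fun d p => d.modify p.2 [] (· ++ [((fun i => (i, c)) p.1)])) PySem.Dict.empty := by
  have e1 : PySem.List.enumerate (colL g c)
      = (PySem.List.enumerate g).map (fun p => (p.1, PySem.List.pyGetD p.2 c 0)) :=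
    pv_enumerate_map _ g 0
  rw [e1, List.foldl_map]
  unfold groupColonne
  rw [PySem.List.enumerate_eq_map_pyRange (d := ([] : List Int)), List.foldl_map]

theorem pv_emettre_groupColonne (g : List (List Int)) (c : Int)
    (res : List (List (Int × Int))) :
    emettre res (groupColonne g c) = res ++ pvE (tagOf "colonne" c) (colL g c) (colL g c) := by
  rw [pv_groupColonne_eq]
  have h := pv_emettre_group (fun i => (i, c))
    (by intro a b hab; simpa using congrArg Prod.fst hab) (colL g c) res
  have ht : tagOf "colonne" c = fun i => (i, c) := funext (fun i => pv_tag_colonne c i)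
  rw [ht]
  exact h

theorem pv_B_eq (g : List (List Int)) :
    cellules_en_conflit_alt g
      = (PySem.List.enumerate g).flatMap (fun p => pvE (tagOf "ligne" p.1) p.2 p.2)
        ++ ((PySem.List.pyRange 0 (PySem.List.len (PySem.List.pyGetD g 0 [])) 1).map
              (fun j => (j, colL g j))).flatMap
            (fun p => pvE (tagOf "colonne" p.1) p.2 p.2) := by
  unfold cellules_en_conflit_alt
  have hrows : (PySem.List.enumerate g).foldl
      (fun res p => emettre res (groupLigne p.1 p.2)) []
      = (PySem.List.enumerate g).flatMap (fun p => pvE (tagOf "ligne" p.1) p.2 p.2) := by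
    rw [PySem.List.foldl_congr_mem
      (g := fun res p => res ++ pvE (tagOf "ligne" p.1) p.2 p.2)
      (h := fun res p _ => pv_emettre_groupLigne p.1 p.2 res)]
    rw [PySem.List.foldl_append_eq_flatMap, List.nil_append]
  rw [hrows]
  rw [PySem.List.foldl_congr_mem
    (g := fun res c => res ++ pvE (tagOf "colonne" c) (colL g c) (colL g c))
    (h := fun res c _ => pv_emettre_groupColonne g c res)]
  rw [PySem.List.foldl_append_eq_flatMap, pv_flatMap_map]


-- ===== VERDICT (by name: the statement is the Claim_ definition above) =====
theorem cellules_en_conflit_spec : Claim_equal_cellules_en_conflit := by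
  intro grille _ _
  unfold Spec_cellules_en_conflit
  rw [pv_A_eq, pv_B_eq]
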